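-- pv_equiv track=rewrite | github.com/phatnt472/python_practice2 | ThucHanh2/phan2/bai12.py | remove_neg
-- ===== SOURCE A (Python) =====
-- def remove_neg(num_list: list):
--     """Remove the nagative numbers from the list num_list
--     >>> numbers = [1,-5,-3,2]
--     >>> remove_neg(numbers)
--     [1, 2]
--     """
--     i = 0
--     while i < len(num_list):
--         if num_list[i] <  0:
--             del num_list[i]
--         else:
--             i+=1
--     return num_list
-- ===== SOURCE B (Python) =====
-- def remove_neg(num_list: list):
--     """Remove the negative numbers from the list num_list (in place)."""
--     w = 0
--     for r in range(len(num_list)):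
--         if num_list[r] >= 0:
--             num_list[w] = num_list[r]
--             w += 1
--     del num_list[w:]
--     return num_list
-- ===== Notes on version B (the rewrite author's own statement) =====
-- stated objective: alternative
-- what changed: Replaces A's while-loop with repeated single-element del (each del shifts the tail) by a single forward compaction pass with a write index plus one tail truncation; intended as faster (measured 7.35x at the largest size both finished, unconfirmed in a timing run).
import Mathlib
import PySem

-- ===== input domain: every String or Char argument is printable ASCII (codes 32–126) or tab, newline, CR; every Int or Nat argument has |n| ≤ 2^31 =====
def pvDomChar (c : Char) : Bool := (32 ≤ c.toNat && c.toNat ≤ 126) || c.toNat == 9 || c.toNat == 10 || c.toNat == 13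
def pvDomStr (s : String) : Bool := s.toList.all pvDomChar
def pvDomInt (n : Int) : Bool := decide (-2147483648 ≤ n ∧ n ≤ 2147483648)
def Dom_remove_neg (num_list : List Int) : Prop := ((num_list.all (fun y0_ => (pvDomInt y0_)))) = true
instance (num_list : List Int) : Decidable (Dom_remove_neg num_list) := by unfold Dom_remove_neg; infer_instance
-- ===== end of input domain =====

-- B replaces A's repeated single-element del by one forward compaction pass with a
-- write index plus one tail truncation; both mutate the Python list in place and the
-- final list-object state coincides, so return-value equality covers the observable effect.

-- ===== PORT A =====
-- A's while loop: state is (i, current list); each step either deletes at i or advances i.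
def removeNegLoopA (i : Nat) (xs : List Int) : List Int :=
  if h : i < xs.length then
    if xs[i] < 0 then
      removeNegLoopA i (xs.eraseIdx i)
    else
      removeNegLoopA (i + 1) xs
  else xs
termination_by xs.length - i
decreasing_by
  · simp [List.length_eraseIdx, h]; omega
  · omega

def remove_neg (num_list : List Int) : List Int := removeNegLoopA 0 num_list

-- ===== PORT B =====
-- B's for loop over range(len): state is (w, current list); `del num_list[w:]` is `take w`.
def remove_neg_alt (num_list : List Int) : List Int :=
  let st := (List.range num_list.length).foldl
    (fun (st : Nat × List Int) (r : Nat) =>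
      if 0 ≤ st.2.getD r 0 then (st.1 + 1, st.2.set st.1 (st.2.getD r 0)) else st)
    (0, num_list)
  st.2.take st.1

-- ===== PRECONDITION & SPEC =====
def Spec_remove_neg (num_list : List Int) (out : List Int) : Prop := out = remove_neg_alt num_list
instance (num_list : List Int) (out : List Int) : Decidable (Spec_remove_neg num_list out) := by unfold Spec_remove_neg; infer_instance

-- ===== CLAIM (what is proved, stated in full; the proofs are below) =====
def Claim_equal_remove_neg : Prop := ∀ (num_list : List Int), Dom_remove_neg num_list → Spec_remove_neg num_list (remove_neg num_list)

-- ===== LEMMAS AND PROOFS =====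

-- the common characterisation: the nonnegative elements, in order
def negFilter (xs : List Int) : List Int := xs.filter (fun x => decide (0 ≤ x))

-- A's loop: elements before i are kept untouched, the rest gets filtered
theorem removeNegLoopA_eq (i : Nat) (xs : List Int) :
    removeNegLoopA i xs = xs.take i ++ negFilter (xs.drop i) := by
  rw [removeNegLoopA]
  by_cases h : i < xs.length
  · rw [dif_pos h]
    by_cases hneg : xs[i] < 0
    · rw [if_pos hneg, removeNegLoopA_eq i (xs.eraseIdx i), List.eraseIdx_eq_take_drop_succ]
      have hle : i ≤ xs.length := le_of_lt h
      have e1 : (xs.take i ++ xs.drop (i + 1)).take i = xs.take i := by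
        rw [List.take_append_of_le_length (by simp [hle])]; simp
      have e2 : (xs.take i ++ xs.drop (i + 1)).drop i = xs.drop (i + 1) := by
        rw [List.drop_append_of_le_length (by simp [hle])]
        simp
      rw [e1, e2]
      have hcons : xs.drop i = xs[i] :: xs.drop (i + 1) := List.drop_eq_getElem_cons h
      have hd : (decide ((0 : Int) ≤ xs[i])) = false := by
        simp only [decide_eq_false_iff_not]; omega
      rw [hcons]
      simp only [negFilter, List.filter_cons, hd]
      simp
    · rw [if_neg hneg, removeNegLoopA_eq (i + 1) xs, List.take_succ_eq_append_getElem h,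
          List.append_assoc]
      have hcons : xs.drop i = xs[i] :: xs.drop (i + 1) := List.drop_eq_getElem_cons h
      have hd : (decide ((0 : Int) ≤ xs[i])) = true := by
        simp only [decide_eq_true_eq]; omega
      rw [hcons]
      simp only [negFilter, List.filter_cons, hd]
      simp
  · rw [dif_neg h]
    have hle : xs.length ≤ i := Nat.le_of_not_lt h
    rw [List.take_of_length_le hle, List.drop_of_length_le hle]
    simp [negFilter]
termination_by xs.length - i
decreasing_by
  · simp [List.length_eraseIdx, h]; omega
  · omega

-- B's loop invariant after processing range k
def BInv (xs : List Int) (k : Nat) (st : Nat × List Int) : Prop :=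
  st.1 = (negFilter (xs.take k)).length ∧
  st.2.take st.1 = negFilter (xs.take k) ∧
  st.2.drop k = xs.drop k ∧
  st.2.length = xs.length ∧
  st.1 ≤ k

theorem BInv_step (xs : List Int) (k : Nat) (st : Nat × List Int) (hk : k < xs.length)
    (h : BInv xs k st) :
    BInv xs (k + 1)
      (if 0 ≤ st.2.getD k 0 then (st.1 + 1, st.2.set st.1 (st.2.getD k 0)) else st) := by
  obtain ⟨hw, htake, hdrop, hlen, hwk⟩ := h
  have hklen2 : k < st.2.length := hlen ▸ hk
  have hget : st.2.getD k 0 = xs[k] := by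
    have h1 : st.2[k] = (st.2.drop k).headI := by
      rw [List.drop_eq_getElem_cons hklen2]; rfl
    have h2 : xs[k] = (xs.drop k).headI := by
      rw [List.drop_eq_getElem_cons hk]; rfl
    rw [List.getD_eq_getElem _ _ hklen2, h1, hdrop, ← h2]
  have htk : xs.take (k + 1) = xs.take k ++ [xs[k]] := List.take_succ_eq_append_getElem hk
  have hdrop1 : st.2.drop (k + 1) = xs.drop (k + 1) := by
    have := congrArg (List.drop 1) hdrop
    simpa [List.drop_drop, Nat.add_comm] using this
  by_cases hpos : 0 ≤ st.2.getD k 0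
  · rw [if_pos hpos]
    have hxk : (0 : Int) ≤ xs[k] := hget ▸ hpos
    have hfilt : negFilter (xs.take (k + 1)) = negFilter (xs.take k) ++ [xs[k]] := by
      simp only [htk, negFilter, List.filter_append]
      simp [hxk]
    have hwlt : st.1 < st.2.length := lt_of_le_of_lt hwk hklen2
    refine ⟨by simp [hfilt, hw], ?_, ?_, by simp [hlen], by omega⟩
    · rw [hfilt, List.take_set, List.take_succ_eq_append_getElem hwlt, htake, hget]
      generalize st.2[st.1] = y
      rw [hw]
      simp
    · rw [List.drop_set, if_pos (by omega : st.1 < k + 1), hdrop1]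
  · rw [if_neg hpos]
    have hxk : xs[k] < 0 := by rw [hget] at hpos; omega
    have hfilt : negFilter (xs.take (k + 1)) = negFilter (xs.take k) := by
      simp only [htk, negFilter, List.filter_append]
      simp [show ¬ (0 : Int) ≤ xs[k] from by omega]
    exact ⟨by rw [hfilt, hw], by rw [hfilt, htake], hdrop1, hlen, by omega⟩

theorem BInv_range (xs : List Int) (k : Nat) (hk : k ≤ xs.length) :
    BInv xs k ((List.range k).foldl
      (fun (st : Nat × List Int) (r : Nat) =>
        if 0 ≤ st.2.getD r 0 then (st.1 + 1, st.2.set st.1 (st.2.getD r 0)) else st)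
      (0, xs)) := by
  induction k with
  | zero => exact ⟨by simp [negFilter], by simp [negFilter], by simp, rfl, le_rfl⟩
  | succ n ih =>
    rw [List.range_succ, List.foldl_append, List.foldl_cons, List.foldl_nil]
    exact BInv_step xs n _ (by omega) (ih (by omega))

theorem alt_eq_filter (xs : List Int) : remove_neg_alt xs = negFilter xs := by
  unfold remove_neg_alt
  obtain ⟨hw, htake, _, _, _⟩ := BInv_range xs xs.length le_rfl
  simpa [List.take_length] using htake

-- ===== VERDICT (by name: the statement is the Claim_ definition above) =====
theorem remove_neg_spec : Claim_equal_remove_neg := by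
  intro xs _
  unfold Spec_remove_neg remove_neg
  rw [removeNegLoopA_eq, alt_eq_filter]
  simp [negFilter]
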